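-- pv_equiv track=rewrite | github.com/Flnch/Advent-of-Code | 2019/01/aoc2019-01_part2.py | calcFuelForModule
-- ===== SOURCE A (Python) =====
-- def calcFuelForModule(mass):
--     """Calculate the needed fuel for a module of mass `mass`, the resulting fuel needed for the fuel(s) and return the total fuel sum."""
--     totalFuel = 0
--     mass = int(mass)
--     nextFuel = mass // 3 - 2
--     while nextFuel > 0:
--         totalFuel += nextFuel
--         nextFuel = nextFuel // 3 - 2
--     return totalFuel
-- ===== SOURCE B (Python) =====
-- def calcFuelForModule(mass):
--     """Calculate the needed fuel for a module of mass `mass`, the resulting fuel needed for the fuel(s) and return the total fuel sum."""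
--     fuel = int(mass) // 3 - 2
--     if fuel <= 0:
--         return 0
--     return fuel + calcFuelForModule(fuel)
-- ===== Notes on version B (the rewrite author's own statement) =====
-- stated objective: simpler
-- what changed: Replaces the accumulator while-loop with a direct self-similar recursion: fuel = mass//3-2; return 0 if fuel <= 0 else fuel + calcFuelForModule(fuel).
import Mathlib
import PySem

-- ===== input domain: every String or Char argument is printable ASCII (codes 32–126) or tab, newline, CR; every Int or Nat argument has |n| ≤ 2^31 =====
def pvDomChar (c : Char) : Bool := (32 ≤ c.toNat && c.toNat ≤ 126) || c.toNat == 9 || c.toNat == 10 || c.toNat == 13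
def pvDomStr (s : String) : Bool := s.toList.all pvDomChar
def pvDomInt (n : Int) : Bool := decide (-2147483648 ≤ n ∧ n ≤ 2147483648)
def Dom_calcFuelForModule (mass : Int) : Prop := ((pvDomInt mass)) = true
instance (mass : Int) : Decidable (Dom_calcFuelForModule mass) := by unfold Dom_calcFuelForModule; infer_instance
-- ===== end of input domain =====

-- ===== PORT A =====
-- while-loop of A: state (totalFuel, nextFuel); terminates since nextFuel//3-2 < nextFuel for nextFuel > 0
def calcFuelForModuleLoop (totalFuel nextFuel : Int) : Int :=
  if h : nextFuel > 0 then
    calcFuelForModuleLoop (totalFuel + nextFuel) (PySem.Int.floordiv nextFuel 3 - 2)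
  else totalFuel
termination_by nextFuel.toNat
decreasing_by
  have := PySem.Int.floordiv_eq_ediv_of_pos (a := nextFuel) (b := 3) (by omega)
  omega

def calcFuelForModule (mass : Int) : Int :=
  calcFuelForModuleLoop 0 (PySem.Int.floordiv mass 3 - 2)

-- ===== PORT B =====
-- B: fuel = mass//3 - 2; 0 if fuel <= 0, else fuel + calcFuelForModule(fuel)
def calcFuelForModule_alt (mass : Int) : Int :=
  let fuel := PySem.Int.floordiv mass 3 - 2
  if h : fuel ≤ 0 then 0
  else fuel + calcFuelForModule_alt fuel
termination_by mass.toNat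
decreasing_by
  have := PySem.Int.floordiv_eq_ediv_of_pos (a := mass) (b := 3) (by omega)
  omega

-- ===== PRECONDITION & SPEC =====
def Spec_calcFuelForModule (mass : Int) (out : Int) : Prop := out = calcFuelForModule_alt mass
instance (mass : Int) (out : Int) : Decidable (Spec_calcFuelForModule mass out) := by unfold Spec_calcFuelForModule; infer_instance

-- ===== CLAIM (what is proved, stated in full; the proofs are below) =====
def Claim_equal_calcFuelForModule : Prop := ∀ (mass : Int), Dom_calcFuelForModule mass → Spec_calcFuelForModule mass (calcFuelForModule mass)

-- ===== LEMMAS AND PROOFS =====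
-- loop invariant: the accumulator loop computes tot plus B's recursive total of the pending fuel
theorem loop_eq_alt_aux (n : Nat) : ∀ (f tot : Int), f.toNat ≤ n →
    calcFuelForModuleLoop tot f = tot + (if f ≤ 0 then 0 else f + calcFuelForModule_alt f) := by
  induction n with
  | zero =>
    intro f tot hn
    rw [calcFuelForModuleLoop]
    split_ifs <;> omega
  | succ n ih =>
    intro f tot hn
    rw [calcFuelForModuleLoop]
    split_ifs with h h2
    · exfalso; omega
    · have hd := PySem.Int.floordiv_eq_ediv_of_pos (a := f) (b := 3) (by omega)
      rw [ih (PySem.Int.floordiv f 3 - 2) (tot + f) (by omega)]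
      have hx : calcFuelForModule_alt f =
          if (PySem.Int.floordiv f 3 - 2) ≤ 0 then 0
          else (PySem.Int.floordiv f 3 - 2) + calcFuelForModule_alt (PySem.Int.floordiv f 3 - 2) := by
        conv_lhs => rw [calcFuelForModule_alt]
        split_ifs <;> rfl
      rw [hx]
      split_ifs <;> omega
    all_goals omega

theorem loop_eq_alt (f tot : Int) :
    calcFuelForModuleLoop tot f = tot + (if f ≤ 0 then 0 else f + calcFuelForModule_alt f) :=
  loop_eq_alt_aux f.toNat f tot (le_refl _)

-- ===== VERDICT (by name: the statement is the Claim_ definition above) =====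
theorem calcFuelForModule_spec : Claim_equal_calcFuelForModule := by
  intro mass _
  unfold Spec_calcFuelForModule calcFuelForModule
  rw [loop_eq_alt]
  have hx : ∀ (m : Int), calcFuelForModule_alt m =
      if (PySem.Int.floordiv m 3 - 2) ≤ 0 then 0
      else (PySem.Int.floordiv m 3 - 2) + calcFuelForModule_alt (PySem.Int.floordiv m 3 - 2) := by
    intro m; conv_lhs => rw [calcFuelForModule_alt]
    split_ifs <;> rfl
  rw [hx mass]
  split_ifs <;> omega
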